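-- pv_equiv track=rewrite | github.com/gautetk/AoC-2020 | src/day3.py | part2
-- ===== SOURCE A (Python) =====
-- import math
--
-- def part2(s):
--     slopes = [
--         (1, 1),
--         (3, 1),
--         (5, 1),
--         (7, 1),
--         (1, 2),
--     ]
--
--     return math.prod([checkSlope(s, dx, dy) for dx, dy in slopes])
--
-- def checkSlope(s, dx, dy):
--     nx = len(s[0])
--     c = 0
--     x = 0
--     y = 0
--     while y+dy < len(s):
--         x = x + dx
--         y = y + dy
--         if s[y][x % nx] == '#':
--             c += 1
--     return c
-- ===== SOURCE B (Python) =====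
-- import math
--
-- def part2(s):
--     # one combined pass over the rows, maintaining five slope counters
--     h = len(s)
--     w = len(s[0])
--     c0 = c1 = c2 = c3 = c4 = 0
--     for y in range(1, h):
--         row = s[y]
--         if row[y % w] == '#':
--             c0 += 1
--         if row[3 * y % w] == '#':
--             c1 += 1
--         if row[5 * y % w] == '#':
--             c2 += 1
--         if row[7 * y % w] == '#':
--             c3 += 1
--         if y % 2 == 0 and row[y // 2 % w] == '#':
--             c4 += 1
--     return c0 * c1 * c2 * c3 * c4
-- ===== Notes on version B (the rewrite author's own statement) =====
-- stated objective: alternative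
-- what changed: Replaces A's five independent while-loop grid traversals through a checkSlope helper with a single pass over the rows that maintains five counters, computing each slope's column by the closed form dx*y (resp. y//2) instead of a running x.
import Mathlib
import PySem

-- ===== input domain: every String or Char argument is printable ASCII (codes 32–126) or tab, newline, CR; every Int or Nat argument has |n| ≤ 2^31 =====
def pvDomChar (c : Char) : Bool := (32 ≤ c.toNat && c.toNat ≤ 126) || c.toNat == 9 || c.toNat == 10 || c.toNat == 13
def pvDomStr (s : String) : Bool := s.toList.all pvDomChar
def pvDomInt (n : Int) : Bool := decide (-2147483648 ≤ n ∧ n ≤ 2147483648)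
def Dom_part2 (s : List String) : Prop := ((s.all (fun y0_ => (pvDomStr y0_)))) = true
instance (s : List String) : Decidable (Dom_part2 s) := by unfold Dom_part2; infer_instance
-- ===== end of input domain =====

-- B folds all five slopes into ONE pass over the rows with five counters and closed-form
-- column indices, replacing A's five separate while-loop traversals via checkSlope.

-- ===== PORT A =====
-- the while-loop of checkSlope: state (c, x, y); fuel bounds the iteration count (dy ≥ 1 at every call site)
def chkLoop (s : List String) (dx dy nx : Int) : Nat → Int → Int → Int → Int
  | 0, c, _, _ => c
  | fuel + 1, c, x, y =>
    if y + dy < (s.length : Int) then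
      let x' := x + dx
      let y' := y + dy
      let c' := if PySem.Str.pyGet? ((PySem.List.pyGet? s y').getD "") (PySem.Int.mod x' nx) == some '#'
                then c + 1 else c
      chkLoop s dx dy nx fuel c' x' y'
    else c

def checkSlope (s : List String) (dx dy : Int) : Int :=
  let nx : Int := (((PySem.List.pyGet? s 0).getD "").toList.length : Int)
  chkLoop s dx dy nx s.length 0 0 0

def part2 (s : List String) : Int :=
  [checkSlope s 1 1, checkSlope s 3 1, checkSlope s 5 1, checkSlope s 7 1, checkSlope s 1 2].foldl (· * ·) 1

-- ===== PORT B =====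
def part2_alt (s : List String) : Int :=
  let h : Int := s.length
  let w : Int := (((PySem.List.pyGet? s 0).getD "").toList.length : Int)
  let r := (PySem.List.pyRange 1 h 1).foldl (fun (st : Int × Int × Int × Int × Int) y =>
      let row := (PySem.List.pyGet? s y).getD ""
      let hit : Int → Bool := fun i => PySem.Str.pyGet? row (PySem.Int.mod i w) == some '#'
      ((if hit y then st.1 + 1 else st.1),
       (if hit (3 * y) then st.2.1 + 1 else st.2.1),
       (if hit (5 * y) then st.2.2.1 + 1 else st.2.2.1),
       (if hit (7 * y) then st.2.2.2.1 + 1 else st.2.2.2.1),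
       (if PySem.Int.mod y 2 == 0 && hit (PySem.Int.floordiv y 2) then st.2.2.2.2 + 1 else st.2.2.2.2)))
    ((0 : Int), (0 : Int), (0 : Int), (0 : Int), (0 : Int))
  r.1 * r.2.1 * r.2.2.1 * r.2.2.2.1 * r.2.2.2.2

-- ===== PRECONDITION & SPEC =====
-- Pre_ = exactly the inputs where Python A returns: A raises IndexError on the empty grid,
-- ZeroDivisionError when s[0] is empty with ≥ 2 rows, and IndexError when a visited cell's
-- column index falls outside its (possibly shorter) row.
def Pre_part2 (s : List String) : Prop :=
  s ≠ [] ∧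
  (2 ≤ s.length →
    0 < (s.headD "").toList.length ∧
    ∀ y ∈ List.range s.length, 1 ≤ y →
      (y % (s.headD "").toList.length < (s.getD y "").toList.length ∧
       (3 * y) % (s.headD "").toList.length < (s.getD y "").toList.length ∧
       (5 * y) % (s.headD "").toList.length < (s.getD y "").toList.length ∧
       (7 * y) % (s.headD "").toList.length < (s.getD y "").toList.length ∧
       (y % 2 = 0 → (y / 2) % (s.headD "").toList.length < (s.getD y "").toList.length)))
instance (s : List String) : Decidable (Pre_part2 s) := by unfold Pre_part2; infer_instance

def pvWitness_part2 : List String := ["..##", "#..."]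

def Spec_part2 (s : List String) (out : Int) : Prop := out = part2_alt s
instance (s : List String) (out : Int) : Decidable (Spec_part2 s out) := by unfold Spec_part2; infer_instance

-- ===== CLAIM (what is proved, stated in full; the proofs are below) =====
def Claim_equal_part2 : Prop := ∀ (s : List String), Dom_part2 s → Pre_part2 s → Spec_part2 s (part2 s)

-- ===== LEMMAS AND PROOFS =====

-- count of '#'-hits over a list of row indices ys, column g y mod nx (the dy = 1 shape)
def cnt (s : List String) (nx : Int) (g : Int → Int) (ys : List Int) (c : Int) : Int :=
  ys.foldl (fun c y =>
    if PySem.Str.pyGet? ((PySem.List.pyGet? s y).getD "") (PySem.Int.mod (g y) nx) == some '#'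
    then c + 1 else c) c

-- the guarded count for the (1,2) slope
def cntE (s : List String) (nx : Int) (ys : List Int) (c : Int) : Int :=
  ys.foldl (fun c y =>
    if PySem.Int.mod y 2 == 0 &&
       (PySem.Str.pyGet? ((PySem.List.pyGet? s y).getD "") (PySem.Int.mod (PySem.Int.floordiv y 2) nx) == some '#')
    then c + 1 else c) c

theorem chkLoop_dy1 (s : List String) (dx nx : Int) :
    ∀ (fuel : Nat) (c y : Int), (s.length : Int) - y ≤ fuel →
      chkLoop s dx 1 nx fuel c (dx * y) y =
        cnt s nx (fun y => dx * y) (PySem.List.pyRange (y + 1) (s.length : Int) 1) c := by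
  intro fuel
  induction fuel with
  | zero =>
    intro c y hf
    rw [PySem.List.pyRange_one_eq_nil (by omega)]
    rfl
  | succ n ih =>
    intro c y hf
    by_cases h : y + 1 < (s.length : Int)
    · rw [chkLoop, if_pos h, PySem.List.pyRange_one_cons (by omega)]
      have hx : dx * y + dx = dx * (y + 1) := by ring
      rw [hx]
      have := ih (if PySem.Str.pyGet? ((PySem.List.pyGet? s (y + 1)).getD "")
          (PySem.Int.mod (dx * (y + 1)) nx) == some '#' then c + 1 else c) (y + 1) (by omega)
      simpa [cnt] using this
    · rw [chkLoop, if_neg h, PySem.List.pyRange_one_eq_nil (by omega)]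
      rfl

theorem chkLoop_dy2 (s : List String) (nx : Int) :
    ∀ (fuel : Nat) (c x y : Int), (s.length : Int) - y ≤ fuel → 2 * x = y →
      chkLoop s 1 2 nx fuel c x y =
        cntE s nx (PySem.List.pyRange (y + 1) (s.length : Int) 1) c := by
  intro fuel
  induction fuel with
  | zero =>
    intro c x y hf hx
    rw [PySem.List.pyRange_one_eq_nil (by omega)]
    rfl
  | succ n ih =>
    intro c x y hf hx
    by_cases h : y + 2 < (s.length : Int)
    · rw [chkLoop, if_pos h]
      have hy2 : y + 1 + 1 = y + 2 := by omega
      rw [PySem.List.pyRange_one_cons (by omega), PySem.List.pyRange_one_cons (by omega), hy2]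
      have hC1 : ¬ ((2 : Int) ∣ (y + 1)) := by omega
      have hC2 : ((2 : Int) ∣ (y + 2)) := by omega
      have hdiv : PySem.Int.floordiv (y + 2) 2 = x + 1 := by
        rw [PySem.Int.floordiv_eq_ediv_of_pos (show (0:Int) < 2 by omega)]; omega
      have hdiv2 : (y + 2) / 2 = x + 1 := by omega
      have hfu : (s.length : Int) - (y + 2) ≤ (n : Int) := by omega
      have := ih (if PySem.Str.pyGet? ((PySem.List.pyGet? s (y + 2)).getD "")
          (PySem.Int.mod (x + 1) nx) == some '#' then c + 1 else c) (x + 1) (y + 2) hfu (by omega)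
      simpa [cntE, hC1, hC2, hdiv, hdiv2] using this
    · rw [chkLoop, if_neg h]
      by_cases h1 : y + 1 < (s.length : Int)
      · rw [PySem.List.pyRange_one_cons (by omega),
          PySem.List.pyRange_one_eq_nil (by omega)]
        have hnd : ¬ ((2 : Int) ∣ y + 1) := by omega
        simp [cntE, hnd]
      · rw [PySem.List.pyRange_one_eq_nil (by omega)]
        rfl

theorem foldl_five (s : List String) (nx : Int) :
    ∀ (ys : List Int) (a b c d e : Int),
      ys.foldl (fun (st : Int × Int × Int × Int × Int) y =>
        let row := (PySem.List.pyGet? s y).getD ""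
        let hit : Int → Bool := fun i => PySem.Str.pyGet? row (PySem.Int.mod i nx) == some '#'
        ((if hit y then st.1 + 1 else st.1),
         (if hit (3 * y) then st.2.1 + 1 else st.2.1),
         (if hit (5 * y) then st.2.2.1 + 1 else st.2.2.1),
         (if hit (7 * y) then st.2.2.2.1 + 1 else st.2.2.2.1),
         (if PySem.Int.mod y 2 == 0 && hit (PySem.Int.floordiv y 2) then st.2.2.2.2 + 1 else st.2.2.2.2)))
        (a, b, c, d, e) =
      (cnt s nx (fun y => y) ys a, cnt s nx (fun y => 3 * y) ys b, cnt s nx (fun y => 5 * y) ys c,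
       cnt s nx (fun y => 7 * y) ys d, cntE s nx ys e) := by
  intro ys
  induction ys with
  | nil => intro a b c d e; rfl
  | cons y ys ih => intro a b c d e; simp only [List.foldl_cons, cnt, cntE]; exact ih _ _ _ _ _

theorem part2_eq_alt (s : List String) : part2 s = part2_alt s := by
  simp only [part2, part2_alt, checkSlope]
  rw [foldl_five]
  have h1 := chkLoop_dy1 s 1 (((PySem.List.pyGet? s 0).getD "").toList.length : Int) s.length 0 0 (by omega)
  have h3 := chkLoop_dy1 s 3 (((PySem.List.pyGet? s 0).getD "").toList.length : Int) s.length 0 0 (by omega)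
  have h5 := chkLoop_dy1 s 5 (((PySem.List.pyGet? s 0).getD "").toList.length : Int) s.length 0 0 (by omega)
  have h7 := chkLoop_dy1 s 7 (((PySem.List.pyGet? s 0).getD "").toList.length : Int) s.length 0 0 (by omega)
  have h2 := chkLoop_dy2 s (((PySem.List.pyGet? s 0).getD "").toList.length : Int) s.length 0 0 0 (by omega) (by omega)
  simp only [mul_zero] at h1 h3 h5 h7
  rw [h1, h3, h5, h7, h2]
  simp [cnt]

-- ===== VERDICT (by name: the statement is the Claim_ definition above) =====
theorem part2_spec : Claim_equal_part2 := by
  intro s _ _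
  unfold Spec_part2
  exact part2_eq_alt s
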